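-- pv_equiv track=rewrite | github.com/kyeon06/algorithm_study | 프로그래머스/lv2/12973. 짝지어 제거하기/짝지어 제거하기.py | solution
-- ===== SOURCE A (Python) =====
-- def solution(s):
--     answer = -1
--     st = []
--
--     for e in s:
--         if e not in st:
--             st.append(e)
--         else:
--             if st[-1] == e:
--                 st.pop()
--             else: st.append(e)
--
--     if len(st) == 0:
--         return 1
--     else: return 0
-- ===== SOURCE B (Python) =====
-- def solution(s):
--     # Repeatedly delete every doubled letter (a character repeated twice in a row) until the string stops changing;
--     # pair-removal is confluent, so the fixpoint is empty iff s reduces to empty.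
--     while True:
--         t = s
--         for c in dict.fromkeys(t):
--             t = t.replace(c + c, '')
--         if t == s:
--             return 1 if s == '' else 0
--         s = t
-- ===== Notes on version B (the rewrite author's own statement) =====
-- stated objective: alternative
-- what changed: Replaces A's single left-to-right stack pass by a string-rewriting fixpoint: repeatedly delete every doubled letter (one str.replace of the two-character repetition per distinct character) until the string stops changing, then test whether the fixpoint is empty; confluence of adjacent-pair removal makes this agree with A.
import Mathlib
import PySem

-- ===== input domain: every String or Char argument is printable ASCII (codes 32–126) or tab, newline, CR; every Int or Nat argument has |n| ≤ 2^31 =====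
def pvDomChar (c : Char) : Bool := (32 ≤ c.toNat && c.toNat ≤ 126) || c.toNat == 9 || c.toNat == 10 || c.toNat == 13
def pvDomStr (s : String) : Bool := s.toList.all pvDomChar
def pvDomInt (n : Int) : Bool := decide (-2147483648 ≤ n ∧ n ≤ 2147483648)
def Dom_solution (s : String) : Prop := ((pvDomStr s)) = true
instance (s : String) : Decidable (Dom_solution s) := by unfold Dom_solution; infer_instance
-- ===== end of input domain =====

-- B is an alternative algorithm: instead of A's one stack pass it repeatedly deletes every
-- doubled letter (a character repeated twice in a row) until the string stops changing and tests whether the fixpoint is empty.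

-- ===== PORT A =====
-- one loop step of A: membership test, then compare last element
def solStepA (st : List Char) (e : Char) : List Char :=
  if e ∉ st then st ++ [e]
  else if st.getLast? = some e then st.dropLast else st ++ [e]

def solution (s : String) : Int :=
  let st := s.toList.foldl solStepA []
  if st.length = 0 then 1 else 0

-- ===== PORT B =====
-- one inner pass of Source B: for c in dict.fromkeys(t): t = t.replace(c + c, '')
def passB (t : List Char) : List Char :=
  (PySem.List.dedup t).foldl (fun u c => PySem.Chars.replace u [c, c] []) t

-- proof-side model of `u.replace(c + c, '')`; needed above passB's lemmas for fixB's termination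
def repl (c : Char) : List Char → List Char
  | a :: b :: t => if a = c ∧ b = c then repl c t else a :: repl c (b :: t)
  | l => l
termination_by l => l.length

theorem repl_length_le (c : Char) : ∀ l : List Char, (repl c l).length ≤ l.length := by
  intro l
  fun_induction repl c l with
  | case1 a b t h ih => simp only [List.length_cons] at *; omega
  | case2 a b t h ih => simp only [List.length_cons] at *; omega
  | case3 l h => exact le_refl _

theorem repl_eq_of_length (c : Char) : ∀ l : List Char,
    (repl c l).length = l.length → repl c l = l := by
  intro l
  fun_induction repl c l with
  | case1 a b t h ih =>
      intro hl
      have := repl_length_le c t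
      simp only [List.length_cons] at hl; omega
  | case2 a b t h ih =>
      intro hl
      simp only [List.length_cons] at hl
      rw [ih (by simp only [List.length_cons]; omega)]
  | case3 l h => intro _; rfl

-- PySem.Chars.replace.go with old = "cc", new = "" computes repl
theorem go_eq (c : Char) : ∀ (fuel : Nat) (l acc : List Char), l.length ≤ fuel →
    PySem.Chars.replace.go [c, c] [] fuel l acc = acc.reverse ++ repl c l := by
  intro fuel
  induction fuel with
  | zero =>
      intro l acc h
      have : l = [] := by cases l <;> simp_all
      subst this
      simp [PySem.Chars.replace.go, repl]
  | succ n ih =>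
      intro l acc h
      match l with
      | [] => simp [PySem.Chars.replace.go, repl]
      | [a] =>
          have hp : ([c, c] : List Char).isPrefixOf [a] = false := by
            simp [List.isPrefixOf]
          simp [PySem.Chars.replace.go, hp, repl]
          rw [ih [] (a :: acc) (by simp)]
          simp [repl]
      | a :: b :: t =>
          by_cases hab : a = c ∧ b = c
          · have hp : ([c, c] : List Char).isPrefixOf (a :: b :: t) = true := by
              simp [List.isPrefixOf, hab.1, hab.2]
            simp only [PySem.Chars.replace.go, hp, if_true]
            have hd : List.drop ([c, c] : List Char).length (a :: b :: t) = t := rfl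
            rw [hd, ih t ([].reverse ++ acc) (by simp at h ⊢; omega)]
            simp [repl, hab.1, hab.2]
          · have hp : ([c, c] : List Char).isPrefixOf (a :: b :: t) = false := by
              simp [List.isPrefixOf]; tauto
            simp only [PySem.Chars.replace.go, hp, Bool.false_eq_true, if_false]
            rw [ih (b :: t) (a :: acc) (by simp at h ⊢; omega)]
            simp [repl, hab]

theorem replace_cc (c : Char) (l : List Char) : PySem.Chars.replace l [c, c] [] = repl c l := by
  unfold PySem.Chars.replace
  simp only [List.isEmpty_cons, Bool.false_eq_true, if_false]
  simpa using go_eq c l.length l [] (le_refl _)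

theorem foldStep_le : ∀ (cs u : List Char),
    ((cs.foldl (fun u c => PySem.Chars.replace u [c, c] []) u).length ≤ u.length) := by
  intro cs
  induction cs with
  | nil => intro u; exact le_refl _
  | cons c cs ih =>
      intro u
      calc ((c :: cs).foldl (fun u c => PySem.Chars.replace u [c, c] []) u).length
          ≤ (PySem.Chars.replace u [c, c] []).length := ih _
        _ ≤ u.length := by rw [replace_cc]; exact repl_length_le c u

theorem foldStep_eq : ∀ (cs u : List Char),
    (cs.foldl (fun u c => PySem.Chars.replace u [c, c] []) u).length = u.length →
    cs.foldl (fun u c => PySem.Chars.replace u [c, c] []) u = u ∧ ∀ c ∈ cs, repl c u = u := by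
  intro cs
  induction cs with
  | nil => intro u _; exact ⟨rfl, by simp⟩
  | cons c cs ih =>
      intro u h
      simp only [List.foldl_cons] at h ⊢
      have h1 : (PySem.Chars.replace u [c, c] []).length = u.length := by
        have := foldStep_le cs (PySem.Chars.replace u [c, c] [])
        have := repl_length_le c u
        rw [replace_cc] at *
        omega
      have hfix : repl c u = u := repl_eq_of_length c u (by rw [← replace_cc]; exact h1)
      have hru : PySem.Chars.replace u [c, c] [] = u := by rw [replace_cc]; exact hfix
      rw [hru] at h ⊢
      obtain ⟨h2, h3⟩ := ih u h
      exact ⟨h2, by intro d hd; rcases List.mem_cons.1 hd with rfl | hd; exact hfix; exact h3 d hd⟩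

theorem passB_length_le (t : List Char) : (passB t).length ≤ t.length :=
  foldStep_le (PySem.List.dedup t) t

theorem passB_eq_of_length (t : List Char) : (passB t).length = t.length → passB t = t :=
  fun h => (foldStep_eq (PySem.List.dedup t) t h).1

-- Source B's outer while loop: iterate passB until the string stops changing
def fixB (t : List Char) : List Char :=
  if passB t = t then t else fixB (passB t)
termination_by t.length
decreasing_by
  have h1 := passB_length_le t
  rcases lt_or_eq_of_le h1 with h | h
  · exact h
  · exact absurd (passB_eq_of_length t h) (by assumption)

def solution_alt (s : String) : Int :=
  if fixB s.toList = [] then 1 else 0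

-- ===== PRECONDITION & SPEC =====
def Spec_solution (s : String) (out : Int) : Prop := out = solution_alt s
instance (s : String) (out : Int) : Decidable (Spec_solution s out) := by unfold Spec_solution; infer_instance

-- ===== CLAIM (what is proved, stated in full; the proofs are below) =====
def Claim_equal_solution : Prop := ∀ (s : String), Dom_solution s → Spec_solution s (solution s)

-- ===== LEMMAS AND PROOFS =====

-- reversed-stack step (top of stack at the head)
def rstep (r : List Char) (e : Char) : List Char :=
  match r with
  | [] => [e]
  | a :: t => if a = e then t else e :: a :: t

theorem stepA_rev' (r : List Char) (e : Char) :
    solStepA r.reverse e = (rstep r e).reverse := by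
  cases r with
  | nil => simp [solStepA, rstep]
  | cons a t =>
      by_cases hae : a = e
      · subst hae
        have hm2 : a ∈ t.reverse ++ [a] := by simp
        simp [solStepA, rstep, hm2]
      · simp only [rstep, if_neg hae, List.reverse_cons]
        by_cases hm : e ∈ t.reverse ++ [a]
        · simp only [solStepA, hm, not_true_eq_false, if_false, List.getLast?_concat,
            Option.some.injEq, if_neg hae]
        · simp [solStepA, hm]

theorem fold_rev (l : List Char) : ∀ r : List Char,
    l.foldl solStepA r.reverse = (l.foldl rstep r).reverse := by
  induction l with
  | nil => intro r; rfl
  | cons e l ih =>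
      intro r
      simp only [List.foldl_cons, stepA_rev' r e]
      exact ih (rstep r e)

theorem chain_rstep {r : List Char} (h : List.IsChain (· ≠ ·) r) (e : Char) :
    List.IsChain (· ≠ ·) (rstep r e) := by
  cases r with
  | nil => simp [rstep]
  | cons a t =>
      by_cases hae : a = e
      · simpa [rstep, hae] using h.tail
      · simpa [rstep, hae] using ⟨Ne.symm hae, h⟩

theorem rstep_rstep {r : List Char} (h : List.IsChain (· ≠ ·) r) (c : Char) :
    rstep (rstep r c) c = r := by
  cases r with
  | nil => simp [rstep]
  | cons a t =>
      by_cases hac : a = c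
      · subst hac
        cases t with
        | nil => simp [rstep]
        | cons b t' =>
            have hab : a ≠ b := (List.isChain_cons_cons.1 h).1
            simp [rstep, Ne.symm hab]
      · simp [rstep, hac]

theorem fold_repl (c : Char) : ∀ l r : List Char, List.IsChain (· ≠ ·) r →
    (repl c l).foldl rstep r = l.foldl rstep r := by
  intro l
  fun_induction repl c l with
  | case1 a b t h ih =>
      intro r hr
      obtain ⟨rfl, rfl⟩ := h
      rw [ih r hr]
      simp only [List.foldl_cons]
      rw [rstep_rstep hr]
  | case2 a b t h ih =>
      intro r hr
      simp only [List.foldl_cons]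
      exact ih (rstep r a) (chain_rstep hr a)
  | case3 l h => intro r hr; rfl

theorem fold_passB (t : List Char) :
    (passB t).foldl rstep [] = t.foldl rstep [] := by
  unfold passB
  generalize PySem.List.dedup t = cs
  induction cs generalizing t with
  | nil => rfl
  | cons c cs ih =>
      simp only [List.foldl_cons]
      rw [ih (PySem.Chars.replace t [c, c] [])]
      rw [replace_cc]
      exact fold_repl c t [] (by simp)

theorem fold_fixB (t : List Char) :
    (fixB t).foldl rstep [] = t.foldl rstep [] := by
  fun_induction fixB t with
  | case1 t h => rfl
  | case2 t h ih => rw [ih, fold_passB]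

theorem fixB_fix (t : List Char) : passB (fixB t) = fixB t := by
  fun_induction fixB t with
  | case1 t h => exact h
  | case2 t h ih => exact ih

theorem not_chain_decomp : ∀ t : List Char, ¬ List.IsChain (· ≠ ·) t →
    ∃ u c v, t = u ++ c :: c :: v := by
  intro t
  induction t with
  | nil => intro h; exact absurd (by simp) h
  | cons a t ih =>
      intro h
      cases t with
      | nil => exact absurd (by simp) h
      | cons b t' =>
          by_cases hab : a = b
          · exact ⟨[], a, t', by simp [hab]⟩
          · have : ¬ List.IsChain (· ≠ ·) (b :: t') := by
              intro hc
              exact h (List.isChain_cons_cons.2 ⟨hab, hc⟩)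
            obtain ⟨u, c, v, huv⟩ := ih this
            exact ⟨a :: u, c, v, by simp [huv]⟩

theorem repl_pair_lt (c : Char) (v : List Char) : ∀ u : List Char,
    (repl c (u ++ c :: c :: v)).length < (u ++ c :: c :: v).length := by
  intro u
  induction u with
  | nil =>
      have h1 : repl c ([] ++ c :: c :: v) = repl c v := by simp [repl]
      rw [h1]
      have := repl_length_le c v
      simp; omega
  | cons a u' ih =>
      obtain ⟨r0, rt, hu⟩ : ∃ r0 rt, u' ++ c :: c :: v = r0 :: rt := by
        cases u' <;> exact ⟨_, _, rfl⟩
      by_cases hc : a = c ∧ r0 = c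
      · have h1 : repl c (a :: r0 :: rt) = repl c rt := by simp [repl, hc]
        have h2 := repl_length_le c rt
        simp only [List.cons_append, hu, h1, List.length_cons]
        omega
      · have h1 : repl c (a :: r0 :: rt) = a :: repl c (r0 :: rt) := by simp [repl, hc]
        have h2 := ih
        rw [hu] at h2
        simp only [List.length_cons] at h2
        simp only [List.cons_append, hu, h1, List.length_cons]
        omega

theorem chain_of_passB_fix (t : List Char) (h : passB t = t) :
    List.IsChain (· ≠ ·) t := by
  by_contra hc
  obtain ⟨u, c, v, huv⟩ := not_chain_decomp t hc
  have hmem : c ∈ t := by rw [huv]; simp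
  have hall : ∀ c ∈ PySem.List.dedup t, repl c t = t := by
    have := foldStep_eq (PySem.List.dedup t) t (by unfold passB at h; rw [h])
    exact this.2
  have hfix : repl c t = t := hall c (by rw [PySem.List.mem_dedup]; exact hmem)
  have hlt := repl_pair_lt c v u
  rw [← huv] at hlt
  rw [hfix] at hlt
  exact lt_irrefl _ hlt

theorem fold_id : ∀ t r : List Char, List.IsChain (· ≠ ·) t →
    (∀ a b, r.head? = some a → t.head? = some b → b ≠ a) →
    t.foldl rstep r = t.reverse ++ r := by
  intro t
  induction t with
  | nil => intro r _ _; simp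
  | cons e t ih =>
      intro r hch hhd
      have hstep : rstep r e = e :: r := by
        cases r with
        | nil => rfl
        | cons a t' =>
            have : e ≠ a := hhd a e rfl rfl
            simp [rstep, Ne.symm this]
      simp only [List.foldl_cons, hstep]
      rw [ih (e :: r) hch.tail]
      · simp
      · intro a b h1 h2
        simp only [List.head?_cons, Option.some.injEq] at h1
        subst h1
        cases t with
        | nil => simp at h2
        | cons b' t' =>
            simp only [List.head?_cons, Option.some.injEq] at h2
            subst h2
            exact Ne.symm (List.isChain_cons_cons.1 hch).1

-- ===== VERDICT (by name: the statement is the Claim_ definition above) =====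
theorem solution_spec : Claim_equal_solution := by
  intro s _
  unfold Spec_solution solution solution_alt
  have hA : s.toList.foldl solStepA [] = (s.toList.foldl rstep []).reverse := by
    simpa using fold_rev s.toList []
  have hfix : (fixB s.toList).foldl rstep [] = s.toList.foldl rstep [] :=
    fold_fixB s.toList
  have hchain : List.IsChain (· ≠ ·) (fixB s.toList) :=
    chain_of_passB_fix _ (fixB_fix s.toList)
  have hid : (fixB s.toList).foldl rstep [] = (fixB s.toList).reverse ++ [] :=
    fold_id _ [] hchain (by intro a b h1 h2; simp at h1)
  have hEq : fixB s.toList = (s.toList.foldl rstep []).reverse := by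
    have := hid.symm.trans hfix
    simpa using congrArg List.reverse this
  rw [hA, hEq]
  by_cases h : s.toList.foldl rstep [] = []
  · simp [h]
  · simp [h]
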